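-- pv_equiv track=rewrite | github.com/marin-community/marin | experiments/posttrain/backtest_statement_roles.py | audit_quotes
-- ===== SOURCE A (Python) =====
-- def audit_quotes(quotes: list[str], corpus: str) -> tuple[int, int, list[str]]:
--     """Return (num_verbatim, num_total, list_of_failures)."""
--     failures = []
--     verbatim = 0
--     for q in quotes:
--         if isinstance(q, str) and q and q in corpus:
--             verbatim += 1
--         else:
--             failures.append(q if isinstance(q, str) else repr(q))
--     return verbatim, len(quotes), failures
-- ===== SOURCE B (Python) =====
-- def audit_quotes(quotes: list[str], corpus: str) -> tuple[int, int, list[str]]: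
--     """Return (num_verbatim, num_total, list_of_failures)."""
--     n = len(corpus)
--     lengths = {len(q) for q in quotes if isinstance(q, str) and q and len(q) <= n}
--     index = {L: {corpus[i:i + L] for i in range(n - L + 1)} for L in lengths}
--
--     def ok(q):
--         return isinstance(q, str) and q and len(q) in index and q in index[len(q)]
--
--     failures = [q if isinstance(q, str) else repr(q) for q in quotes if not ok(q)]
--     return len(quotes) - len(failures), len(quotes), failures
-- ===== Notes on version B (the rewrite author's own statement) =====
-- stated objective: faster
-- what changed: B precomputes, for each distinct quote length L, the hash set of all length-L corpus substrings once, so each quote becomes a constant-expected-time set lookup instead of a substring scan of the corpus; failures are collected by a filter and the verbatim count is obtained as len(quotes) - len(failures).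
import Mathlib
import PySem

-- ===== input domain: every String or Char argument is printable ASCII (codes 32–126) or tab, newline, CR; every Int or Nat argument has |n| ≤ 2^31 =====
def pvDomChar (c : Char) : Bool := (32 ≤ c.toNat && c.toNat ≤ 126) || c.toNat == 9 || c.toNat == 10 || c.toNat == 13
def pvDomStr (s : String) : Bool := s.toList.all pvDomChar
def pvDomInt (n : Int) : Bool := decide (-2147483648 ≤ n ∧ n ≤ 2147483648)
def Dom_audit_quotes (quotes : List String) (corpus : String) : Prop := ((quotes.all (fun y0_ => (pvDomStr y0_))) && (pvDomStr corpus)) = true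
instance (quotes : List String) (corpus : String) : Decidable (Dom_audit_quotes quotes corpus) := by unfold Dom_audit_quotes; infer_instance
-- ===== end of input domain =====

-- B replaces A's per-quote substring scan of the corpus by a precomputed index: for each
-- distinct quote length L the set of all length-L corpus substrings is built once, and each
-- quote becomes a set lookup; failures are a filter, the count is len(quotes) - len(failures).
-- (Under the type convention every quote is a string, so A's isinstance checks are always true.)

-- ===== PORT A =====
def audit_quotes (quotes : List String) (corpus : String) : Int × Int × List String :=
  -- failures = []; verbatim = 0; for q in quotes: ...
  let st := quotes.foldl (fun (st : List String × Int) q =>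
      if q ≠ "" ∧ PySem.Str.isIn q corpus = true then (st.1, st.2 + 1)
      else (st.1 ++ [q], st.2)) ([], 0)
  (st.2, (quotes.length : Int), st.1)

-- ===== PORT B =====
-- {corpus[i:i+L] for i in range(n - L + 1)}
def pvSubstrSet (corpus : String) (L : Int) : PySem.Set String :=
  PySem.Set.ofList ((PySem.List.pyRange 0 (PySem.Str.len corpus - L + 1) 1).map
    (fun i => PySem.Str.slice corpus (some i) (some (i + L))))

-- {len(q) for q in quotes if isinstance(q, str) and q and len(q) <= n}
def pvLengths (quotes : List String) (corpus : String) : PySem.Set Int :=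
  PySem.Set.ofList ((quotes.filter
    (fun q => decide (q ≠ "") && decide (PySem.Str.len q ≤ PySem.Str.len corpus))).map
    (fun q => PySem.Str.len q))

-- {L: {corpus[i:i+L] for i in range(n - L + 1)} for L in lengths}
def pvIndex (quotes : List String) (corpus : String) : PySem.Dict Int (PySem.Set String) :=
  (pvLengths quotes corpus).foldl (fun d L => d.insert L (pvSubstrSet corpus L)) PySem.Dict.empty

-- def ok(q): return isinstance(q, str) and q and len(q) in index and q in index[len(q)]
def pvOk (index : PySem.Dict Int (PySem.Set String)) (q : String) : Bool :=
  decide (q ≠ "") &&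
    (match index.get? (PySem.Str.len q) with
     | some s => PySem.Set.contains s q
     | none => false)

def audit_quotes_alt (quotes : List String) (corpus : String) : Int × Int × List String :=
  let index := pvIndex quotes corpus
  let failures := quotes.filter (fun q => !(pvOk index q))
  ((quotes.length : Int) - (failures.length : Int), (quotes.length : Int), failures)

-- ===== PRECONDITION & SPEC =====
def Spec_audit_quotes (quotes : List String) (corpus : String) (out : Int × Int × List String) : Prop := out = audit_quotes_alt quotes corpus
instance (quotes : List String) (corpus : String) (out : Int × Int × List String) : Decidable (Spec_audit_quotes quotes corpus out) := by unfold Spec_audit_quotes; infer_instance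

-- ===== CLAIM (what is proved, stated in full; the proofs are below) =====
def Claim_equal_audit_quotes : Prop := ∀ (quotes : List String) (corpus : String), Dom_audit_quotes quotes corpus → Spec_audit_quotes quotes corpus (audit_quotes quotes corpus)

-- ===== LEMMAS AND PROOFS =====

-- the index is a pure function of the key: lookups in the fold-built dict
theorem pv_get?_index (corpus : String) (ks : List Int) (d : PySem.Dict Int (PySem.Set String)) (L : Int) :
    (ks.foldl (fun d L => d.insert L (pvSubstrSet corpus L)) d).get? L
      = if L ∈ ks then some (pvSubstrSet corpus L) else d.get? L := by
  induction ks generalizing d with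
  | nil => simp
  | cons k ks ih =>
    rw [List.foldl_cons, ih, PySem.Dict.get?_insert]
    by_cases h : L ∈ ks
    · simp [h]
    · by_cases hk : L = k <;> simp [h, hk]

-- membership in the length-L substring set is exactly Python's 'q in corpus' (for L = len(q) ≤ len(corpus))
theorem pv_contains_substrSet (corpus q : String) (hne : q ≠ "") :
    PySem.Set.contains (pvSubstrSet corpus (PySem.Str.len q)) q = PySem.Str.isIn q corpus := by
  rw [Bool.eq_iff_iff, PySem.Set.contains_iff, pvSubstrSet, PySem.Set.mem_ofList, List.mem_map,
    PySem.Str.isIn_iff_infix, ← PySem.Chars.isIn_iff_infix,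
    ← PySem.Chars.exists_prefix_drop_iff_isIn]
  constructor
  · rintro ⟨i, hi, hq⟩
    rw [PySem.List.mem_pyRange_one] at hi
    obtain ⟨j, rfl⟩ : ∃ j : Nat, i = (j : Int) := ⟨i.toNat, (Int.toNat_of_nonneg hi.1).symm⟩
    refine ⟨j, ?_⟩
    rw [List.prefix_iff_eq_take]
    have : (PySem.Str.slice corpus (some (j : Int)) (some ((j : Int) + PySem.Str.len q))).toList = q.toList := by
      rw [hq]
    simpa [PySem.Str.slice, PySem.Str.len_eq,
      PySem.Chars.slice_eq_listSlice, PySem.List.slice_natCast_add] using this.symm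
  · rintro ⟨j, hpre⟩
    have h1 : q.toList ≠ [] := by
      intro h
      exact hne (String.toList_inj.mp (by simp [h]))
    have h1' : 1 ≤ q.toList.length := List.length_pos_of_ne_nil h1
    have hjlen : q.toList.length ≤ (corpus.toList.drop j).length := hpre.length_le
    rw [List.length_drop] at hjlen
    refine ⟨(j : Int), ?_, ?_⟩
    · rw [PySem.List.mem_pyRange_one]
      constructor
      · exact Int.natCast_nonneg j
      · rw [PySem.Str.len_eq, PySem.Str.len_eq]
        omega
    · apply String.toList_inj.mp
      rw [List.prefix_iff_eq_take] at hpre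
      simp only [PySem.Str.slice, PySem.Str.len_eq,
        PySem.Chars.slice_eq_listSlice, String.toList_ofList]
      rw [show ((j : Int) + (q.toList.length : Int)) = ((j : Nat) : Int) + ((q.toList.length : Nat) : Int) by ring]
      rw [PySem.List.slice_natCast_add]
      exact hpre.symm

-- for quotes actually in the list, B's indexed test agrees with A's substring test
theorem pv_ok_eq (quotes : List String) (corpus : String) (q : String) (hq : q ∈ quotes) :
    pvOk (pvIndex quotes corpus) q = (decide (q ≠ "") && PySem.Str.isIn q corpus) := by
  by_cases hqe : q = ""
  · simp [pvOk, hqe]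
  · by_cases hle : q.toList.length ≤ corpus.toList.length
    · have hmem : PySem.Str.len q ∈ pvLengths quotes corpus := by
        rw [pvLengths, PySem.Set.mem_ofList, List.mem_map]
        refine ⟨q, ?_, rfl⟩
        rw [List.mem_filter]
        refine ⟨hq, ?_⟩
        simp only [Bool.and_eq_true, decide_eq_true_eq]
        refine ⟨hqe, ?_⟩
        rw [PySem.Str.len_eq, PySem.Str.len_eq]
        exact_mod_cast hle
      rw [pvOk, pvIndex, pv_get?_index, if_pos hmem]
      dsimp only
      rw [pv_contains_substrSet corpus q hqe]
    · have hnone : (pvIndex quotes corpus).get? (PySem.Str.len q) = none := by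
        rw [pvIndex, pv_get?_index, if_neg, PySem.Dict.get?_empty]
        intro hmem
        rw [pvLengths, PySem.Set.mem_ofList, List.mem_map] at hmem
        obtain ⟨q', hq', hlen⟩ := hmem
        rw [List.mem_filter] at hq'
        have := hq'.2
        simp only [Bool.and_eq_true, decide_eq_true_eq] at this
        have h2 := this.2
        simp only [PySem.Str.len_eq] at hlen h2
        omega
      have hfalse : PySem.Str.isIn q corpus = false := by
        rw [Bool.eq_false_iff]
        intro h
        have := (PySem.Str.isIn_iff_infix q corpus).mp h
        exact hle this.length_le
      rw [pvOk, hnone, hfalse]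
-- the loop invariant of A's fold
theorem audit_quotes_foldl_inv (corpus : String) (qs : List String) (fs : List String) (v : Int) :
    qs.foldl (fun (st : List String × Int) q =>
      if q ≠ "" ∧ PySem.Str.isIn q corpus = true then (st.1, st.2 + 1)
      else (st.1 ++ [q], st.2)) (fs, v)
    = (fs ++ qs.filter (fun q => !(decide (q ≠ "") && PySem.Str.isIn q corpus)),
       v + (qs.countP (fun q => decide (q ≠ "") && PySem.Str.isIn q corpus) : Int)) := by
  induction qs generalizing fs v with
  | nil => simp
  | cons q qs ih =>
    rw [List.foldl_cons, List.filter_cons, List.countP_cons]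
    by_cases h : q ≠ "" ∧ PySem.Str.isIn q corpus = true
    · have hb : (decide (q ≠ "") && PySem.Str.isIn q corpus) = true := by
        rw [Bool.and_eq_true, decide_eq_true_eq]; exact h
      rw [if_pos h, ih]
      refine Prod.ext (by rw [hb]; simp) ?_
      rw [hb]
      push_cast
      simp
      ring
    · have hb : (decide (q ≠ "") && PySem.Str.isIn q corpus) = false := by
        rw [Bool.and_eq_false_iff]
        by_cases h1 : q = ""
        · left; simp [h1]
        · rcases not_and_or.mp h with h2 | h2
          · exact absurd (not_not.mp h2) h1
          · right; simpa using h2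
      rw [if_neg h, ih]
      refine Prod.ext (by rw [hb]; simp) ?_
      rw [hb]
      simp

-- ===== VERDICT (by name: the statement is the Claim_ definition above) =====
theorem audit_quotes_spec : Claim_equal_audit_quotes := by
  intro quotes corpus _
  unfold Spec_audit_quotes audit_quotes audit_quotes_alt
  rw [audit_quotes_foldl_inv]
  simp only [List.nil_append, zero_add]
  have hfilter : quotes.filter (fun q => !(pvOk (pvIndex quotes corpus) q))
      = quotes.filter (fun q => !(decide (q ≠ "") && PySem.Str.isIn q corpus)) := by
    apply List.filter_congr
    intro q hq
    rw [pv_ok_eq quotes corpus q hq]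
  rw [hfilter]
  refine Prod.ext ?_ rfl
  have h := List.length_eq_countP_add_countP
      (p := fun q => decide (q ≠ "") && PySem.Str.isIn q corpus) (l := quotes)
  have h2 : (quotes.filter fun q => !(decide (q ≠ "") && PySem.Str.isIn q corpus)).length
      = quotes.countP (fun q => !(decide (q ≠ "") && PySem.Str.isIn q corpus)) := by
    rw [List.countP_eq_length_filter]
  have h3 : quotes.countP (fun a => decide ¬(decide (a ≠ "") && PySem.Str.isIn a corpus) = true)
      = quotes.countP (fun q => !(decide (q ≠ "") && PySem.Str.isIn q corpus)) := by
    apply List.countP_congr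
    intro a _
    simp
  rw [h3] at h
  dsimp only
  rw [h2]
  omega
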